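-- pv_equiv track=rewrite | github.com/pturdaibay/ARC | data/src/solutils.py | find_unique_c909285e
-- ===== SOURCE A (Python) =====
-- def get_colour(position, grid):
--     """Return the colour for a give position"""
--     x, y = position
--     return grid[y][x]
--
-- def find_unique_c909285e(shapes, grid):
--     """Finds a unique shape in all given shapes, the uniqueness is based on
--     colour. Returns the index of the unique shape"""
--     #Initialise a dictionary to use to hold colours vs shape indexes
--     colour_dict = dict()
--     # Go through shapes, find their colour, and add them up on the dictionary
--     for i in range(0, len(shapes)):
--         if len(shapes[i]) > 1:
--             colour = get_colour(shapes[i][0], grid)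
--             if colour_dict.get(colour, None):
--                 colour_dict[colour].append(i)
--             else:
--                 colour_dict[colour] = [i]
--     # Return shape indexes for colours with a single shape using them
--     # in theory should be only one for this task
--     return [colour_dict[i][0] for i in colour_dict.keys() if len(colour_dict[i]) == 1]
-- ===== SOURCE B (Python) =====
-- def get_colour(position, grid):
--     """Return the colour for a give position"""
--     x, y = position
--     return grid[y][x]
--
-- def find_unique_c909285e(shapes, grid):
--     """Sort the (colour, index) records of the multi-cell shapes by colour,
--     scan the sorted list run by run keeping the index of each length-1 run,
--     and sort the surviving indexes back into shape order."""
--     entries = sorted((get_colour(shape[0], grid), i)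
--                      for i, shape in enumerate(shapes) if len(shape) > 1)
--     result = []
--     while entries:
--         colour, idx = entries[0]
--         run = 1
--         while run < len(entries) and entries[run][0] == colour:
--             run += 1
--         if run == 1:
--             result.append(idx)
--         entries = entries[run:]
--     return sorted(result)
-- ===== Notes on version B (the rewrite author's own statement) =====
-- stated objective: alternative
-- what changed: A hashes indexes into a dict colour -> list of indexes and emits the head of each singleton group in key order; B never groups: it sorts the (colour, index) records of the multi-cell shapes, scans the sorted list run by run keeping the index of each length-1 colour run, and sorts the kept indexes back into shape order.
import Mathlib
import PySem

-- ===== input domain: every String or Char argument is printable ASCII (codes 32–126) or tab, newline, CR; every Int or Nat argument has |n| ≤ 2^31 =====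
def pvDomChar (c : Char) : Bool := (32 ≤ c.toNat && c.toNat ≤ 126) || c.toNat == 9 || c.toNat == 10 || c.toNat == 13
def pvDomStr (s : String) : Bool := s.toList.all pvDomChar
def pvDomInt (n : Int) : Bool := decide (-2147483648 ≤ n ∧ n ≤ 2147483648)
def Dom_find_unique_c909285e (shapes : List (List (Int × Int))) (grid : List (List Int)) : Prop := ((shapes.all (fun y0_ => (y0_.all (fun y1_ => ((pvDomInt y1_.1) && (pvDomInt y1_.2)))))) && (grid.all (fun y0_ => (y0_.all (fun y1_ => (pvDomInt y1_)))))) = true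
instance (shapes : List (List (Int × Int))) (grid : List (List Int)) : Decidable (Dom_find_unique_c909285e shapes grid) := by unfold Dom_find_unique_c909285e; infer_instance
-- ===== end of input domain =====

-- B replaces A's grouping dict (colour -> list of shape indexes, heads of the singleton
-- groups in key order) by sort-then-scan: sort the (colour, index) records, keep the
-- index of each length-1 colour run, sort the kept indexes (objective: alternative).

-- ===== PORT A =====
def get_colour (position : Int × Int) (grid : List (List Int)) : Int :=
  PySem.List.pyGetD (PySem.List.pyGetD grid position.2 []) position.1 0

def find_unique_c909285e (shapes : List (List (Int × Int))) (grid : List (List Int)) : List Int :=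
  let colour_dict : PySem.Dict Int (List Int) :=
    (PySem.List.pyRange 0 (shapes.length : Int) 1).foldl (fun d i =>
      let s := PySem.List.pyGetD shapes i []
      if 1 < s.length then
        let colour := get_colour (PySem.List.pyGetD s 0 (0, 0)) grid
        match d.get? colour with
        | some xs => if xs.isEmpty then d.insert colour [i] else d.insert colour (xs ++ [i])
        | none => d.insert colour [i]
      else d) PySem.Dict.empty
  (colour_dict.keys.filter (fun c => (colour_dict.getD c []).length == 1)).map
    (fun c => PySem.List.pyGetD (colour_dict.getD c []) 0 0)

-- ===== PORT B =====
-- the while loop over the sorted entry list: run = 1 + length of the equal-colour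
-- takeWhile of the tail, entries = entries[run:] is the dropWhile
def pvRunScan : List (Int × Int) → List Int
  | [] => []
  | e :: rest =>
    if (rest.takeWhile (fun q => q.1 == e.1)).isEmpty then
      e.2 :: pvRunScan (rest.dropWhile (fun q => q.1 == e.1))
    else
      pvRunScan (rest.dropWhile (fun q => q.1 == e.1))
termination_by l => l.length
decreasing_by
  all_goals simpa using Nat.lt_succ_of_le (List.length_dropWhile_le _ _)

def find_unique_c909285e_alt (shapes : List (List (Int × Int))) (grid : List (List Int)) : List Int :=
  let entries := PySem.List.sorted2
    (((PySem.List.enumerate shapes 0).filter (fun p => 1 < p.2.length)).map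
      (fun p => (get_colour (PySem.List.pyGetD p.2 0 (0, 0)) grid, p.1)))
    Prod.fst Prod.snd
  PySem.List.sorted (pvRunScan entries) (fun x => x) false

-- ===== PRECONDITION & SPEC =====
-- Pre_ excludes exactly the inputs where Python A raises IndexError: some shape with
-- more than one cell whose first position indexes outside the grid (negative indexes
-- wrap, Python-style, and stay inside Pre_).
def Pre_find_unique_c909285e (shapes : List (List (Int × Int))) (grid : List (List Int)) : Prop :=
  ∀ s ∈ shapes, 1 < s.length →
    PySem.Raise.InRange grid.length (s.headD (0, 0)).2 ∧
    PySem.Raise.InRange (PySem.List.pyGetD grid (s.headD (0, 0)).2 []).length (s.headD (0, 0)).1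
instance (shapes : List (List (Int × Int))) (grid : List (List Int)) : Decidable (Pre_find_unique_c909285e shapes grid) := by unfold Pre_find_unique_c909285e; infer_instance

def pvWitness_find_unique_c909285e : (List (List (Int × Int))) × List (List Int) :=
  ([[(0, 0), (1, 0)], [(1, 0), (0, 0)], [(0, 0)]], [[3, 5]])

def Spec_find_unique_c909285e (shapes : List (List (Int × Int))) (grid : List (List Int)) (out : List Int) : Prop := out = find_unique_c909285e_alt shapes grid
instance (shapes : List (List (Int × Int))) (grid : List (List Int)) (out : List Int) : Decidable (Spec_find_unique_c909285e shapes grid out) := by unfold Spec_find_unique_c909285e; infer_instance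

-- ===== CLAIM (what is proved, stated in full; the proofs are below) =====
def Claim_equal_find_unique_c909285e : Prop := ∀ (shapes : List (List (Int × Int))) (grid : List (List Int)), Dom_find_unique_c909285e shapes grid → Pre_find_unique_c909285e shapes grid → Spec_find_unique_c909285e shapes grid (find_unique_c909285e shapes grid)

-- ===== LEMMAS AND PROOFS =====

-- the (index, colour) records of the multi-cell shapes, in shape order (proof-only)
def pvEnt (shapes : List (List (Int × Int))) (grid : List (List Int)) : List (Int × Int) :=
  ((PySem.List.enumerate shapes 0).filter (fun p => 1 < p.2.length)).map
    (fun p => (p.1, get_colour (PySem.List.pyGetD p.2 0 (0, 0)) grid))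

-- xs[j] on a cons cell for a positive index steps to the tail.
theorem pyGetD_cons_of_one_le {α : Type} (x : α) (t : List α) (j : Int) (d : α) (h : 1 ≤ j) :
    PySem.List.pyGetD (x :: t) j d = PySem.List.pyGetD t (j - 1) d := by
  have h0 : (0:Int) ≤ j := by omega
  have h0' : (0:Int) ≤ j - 1 := by omega
  simp only [PySem.List.pyGetD, PySem.List.pyGet?, PySem.List.pyIdx?, List.length_cons,
    if_pos h0, if_pos h0']
  by_cases h2 : j - 1 < (t.length : Int)
  · rw [if_pos (by push_cast; omega : j < ((t.length + 1 : Nat) : Int)), if_pos h2]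
    have hj : j.toNat = (j - 1).toNat + 1 := by omega
    simp only [Option.bind_some]
    rw [hj]
    simp
  · rw [if_neg (by push_cast; omega : ¬ j < ((t.length + 1 : Nat) : Int)), if_neg h2]
    rfl

-- A 'for i in range(a, a+len(xs))' loop reading xs[i-a] is a loop over enumerate(xs, a).
theorem foldl_pyRange_eq_foldl_enumerate {α β : Type} (d0 : α) (g : β → Int → α → β) :
    ∀ (xs : List α) (a : Int) (init : β),
      (PySem.List.pyRange a (a + xs.length) 1).foldl
          (fun acc i => g acc i (PySem.List.pyGetD xs (i - a) d0)) init
        = (PySem.List.enumerate xs a).foldl (fun acc p => g acc p.1 p.2) init := by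
  intro xs
  induction xs with
  | nil =>
    intro a init
    simp [PySem.List.enumerate]
  | cons x t ih =>
    intro a init
    have hlen : a + (((x :: t).length : Nat) : Int) = (a + 1) + (t.length : Int) := by
      simp; omega
    rw [hlen, PySem.List.pyRange_one_cons (by omega : a < (a + 1) + (t.length : Int)),
      PySem.List.enumerate_cons]
    simp only [List.foldl_cons, sub_self, PySem.List.pyGetD_zero_cons]
    rw [← ih (a + 1) (g init a x)]
    exact PySem.List.foldl_congr_mem _ _ _ _ (by
      intro acc i hi
      rw [PySem.List.mem_pyRange_one] at hi
      rw [pyGetD_cons_of_one_le x t (i - a) d0 (by omega)]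
      ring_nf)

-- fold two functions that agree on states satisfying an invariant the second preserves
theorem foldl_eq_of_inv {β σ : Type} (Inv : σ → Prop) (f g : σ → β → σ)
    (hfg : ∀ s b, Inv s → f s b = g s b) (hg : ∀ s b, Inv s → Inv (g s b)) :
    ∀ (l : List β) (s : σ), Inv s → l.foldl f s = l.foldl g s := by
  intro l
  induction l with
  | nil => intro s _; rfl
  | cons b t ih =>
    intro s hs
    simp only [List.foldl_cons]
    rw [hfg s b hs, ih (g s b) (hg s b hs)]

-- invariant of A's dict: every stored group is nonempty
def pvInv (d : PySem.Dict Int (List Int)) : Prop := ∀ c xs, d.get? c = some xs → xs ≠ []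

theorem pvInv_insert (d : PySem.Dict Int (List Int)) (k : Int) (v : List Int)
    (hd : pvInv d) (hv : v ≠ []) : pvInv (d.insert k v) := by
  intro c xs h
  rw [PySem.Dict.get?_insert] at h
  by_cases hc : c = k
  · simp [hc] at h; exact h ▸ hv
  · exact hd c xs (by simpa [hc] using h)

-- A's branch on colour_dict.get(colour, None) is 'append i to the group of colour'
def pvStepA (d : PySem.Dict Int (List Int)) (q : Int × Int) : PySem.Dict Int (List Int) :=
  match d.get? q.2 with
  | some xs => if xs.isEmpty then d.insert q.2 [q.1] else d.insert q.2 (xs ++ [q.1])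
  | none => d.insert q.2 [q.1]

theorem pvStepA_eq_modify (d : PySem.Dict Int (List Int)) (q : Int × Int) (hd : pvInv d) :
    pvStepA d q = d.modify q.2 [] (fun v => v ++ [q.1]) := by
  unfold pvStepA PySem.Dict.modify
  cases h : d.get? q.2 with
  | none => rw [PySem.Dict.getD_eq_get?_getD, h]; rfl
  | some xs =>
    have hne : xs ≠ [] := hd q.2 xs h
    rw [PySem.Dict.getD_eq_get?_getD, h]
    simp [List.isEmpty_eq_false_iff.mpr hne]

theorem pvInv_modify (d : PySem.Dict Int (List Int)) (q : Int × Int) (hd : pvInv d) :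
    pvInv (d.modify q.2 [] (fun v => v ++ [q.1])) := by
  unfold PySem.Dict.modify
  exact pvInv_insert d q.2 _ hd (by simp)

-- keep-first dedup commutes with a filter that only keeps elements of multiplicity <= 1
theorem ofList_filter_of_count_le_one {α : Type} [BEq α] [LawfulBEq α]
    (q : α → Bool) : ∀ (l : List α), (∀ x, q x = true → l.count x ≤ 1) →
    (PySem.Set.ofList l).filter q = l.filter q := by
  intro l
  induction l with
  | nil => simp [PySem.Set.ofList]
  | cons x t ih =>
    intro h
    rw [PySem.Set.ofList_cons]
    have ht : ∀ y, q y = true → t.count y ≤ 1 := by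
      intro y hy
      have h1 := h y hy
      have h2 : t.count y ≤ (x :: t).count y := by
        rw [List.count_cons]; split_ifs <;> omega
      omega
    by_cases hq : q x = true
    · have hxt : x ∉ t := by
        have h1 := h x hq
        rw [List.count_cons_self] at h1
        exact List.count_eq_zero.mp (by omega)
      have hdis : (PySem.Set.ofList t).discard x = PySem.Set.ofList t := by
        unfold PySem.Set.discard
        apply List.filter_eq_self.mpr
        intro y hy
        have hyt : y ∈ t := (PySem.Set.mem_ofList t y).mp hy
        simp only [Bool.not_eq_eq_eq_not, Bool.not_true, beq_eq_false_iff_ne, ne_eq]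
        intro hyx
        exact absurd (hyx ▸ hyt) hxt
      rw [List.filter_cons_of_pos hq, hdis, ih ht, ← List.filter_cons_of_pos hq]
    · rw [List.filter_cons_of_neg (by simpa using hq),
        List.filter_cons_of_neg (by simpa using hq)]
      unfold PySem.Set.discard
      rw [List.filter_comm, ih ht]
      apply List.filter_eq_self.mpr
      intro y hy
      simp only [Bool.not_eq_eq_eq_not, Bool.not_true, beq_eq_false_iff_ne, ne_eq]
      intro hyx
      exact hq (hyx ▸ (List.of_mem_filter hy))

-- A's return value, characterised: the indexes whose colour has multiplicity 1 among
-- the (index, colour) records of the multi-cell shapes, in shape order.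
theorem pvA_countForm (shapes : List (List (Int × Int))) (grid : List (List Int)) :
    find_unique_c909285e shapes grid
      = ((pvEnt shapes grid).filter
          (fun e => ((pvEnt shapes grid).map (fun e => e.2)).count e.2 == 1)).map
          (fun e => e.1) := by
  unfold find_unique_c909285e
  simp only []
  let key : (Int × List (Int × Int)) → Int :=
    fun p => get_colour (PySem.List.pyGetD p.2 0 (0, 0)) grid
  let entries : List (Int × Int) := pvEnt shapes grid
  let colours : List Int := entries.map (fun e => e.2)
  -- Step 1: A's index loop is the same fold over enumerate(shapes)
  have h1 : (PySem.List.pyRange 0 (shapes.length : Int) 1).foldl (fun d i =>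
      let s := PySem.List.pyGetD shapes i []
      if 1 < s.length then
        let colour := get_colour (PySem.List.pyGetD s 0 (0, 0)) grid
        match d.get? colour with
        | some xs => if xs.isEmpty then d.insert colour [i] else d.insert colour (xs ++ [i])
        | none => d.insert colour [i]
      else d) PySem.Dict.empty
      = (PySem.List.enumerate shapes 0).foldl (fun d p =>
          if 1 < p.2.length then pvStepA d (p.1, key p) else d) PySem.Dict.empty := by
    have hg := foldl_pyRange_eq_foldl_enumerate (d0 := ([] : List (Int × Int)))
      (g := fun (d : PySem.Dict Int (List Int)) (i : Int) (s : List (Int × Int)) =>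
        if 1 < s.length then pvStepA d (i, get_colour (PySem.List.pyGetD s 0 (0, 0)) grid)
        else d) shapes 0 PySem.Dict.empty
    simp only [zero_add, sub_zero] at hg
    rw [← hg]
    rfl
  rw [h1]
  -- Step 2: drop the guard (fold over the filtered list), then push through the map
  have h2 : (PySem.List.enumerate shapes 0).foldl (fun d p =>
        if 1 < p.2.length then pvStepA d (p.1, key p) else d) PySem.Dict.empty
      = entries.foldl pvStepA PySem.Dict.empty := by
    show _ = (((PySem.List.enumerate shapes 0).filter (fun p => 1 < p.2.length)).map
      (fun p => (p.1, key p))).foldl pvStepA PySem.Dict.empty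
    rw [List.foldl_map, List.foldl_filter]
    simp only [decide_eq_true_eq]
  rw [h2]
  -- Step 3: replace the branchy step by Dict.modify, using the nonempty-groups invariant
  have h3 : entries.foldl pvStepA PySem.Dict.empty
      = (entries.map Prod.swap).foldl
          (fun d q => d.modify q.1 [] (fun v => v ++ [q.2])) PySem.Dict.empty := by
    calc entries.foldl pvStepA PySem.Dict.empty
        = entries.foldl (fun d q => d.modify q.2 [] (fun v => v ++ [q.1]))
            PySem.Dict.empty :=
          foldl_eq_of_inv pvInv _ _
            (fun d q hd => pvStepA_eq_modify d q hd)
            (fun d q hd => pvInv_modify d q hd)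
            entries PySem.Dict.empty
            (by intro c xs h; rw [PySem.Dict.get?_empty] at h; exact absurd h (by simp))
      _ = (entries.map Prod.swap).foldl
            (fun d q => d.modify q.1 [] (fun v => v ++ [q.2])) PySem.Dict.empty := by
          conv_rhs => rw [List.foldl_map]
          simp [Prod.swap]
  rw [h3]
  set D := (entries.map Prod.swap).foldl
      (fun d q => d.modify q.1 [] (fun v => v ++ [q.2])) PySem.Dict.empty with hD
  -- the dict's content, described
  have hGetD : ∀ c : Int, D.getD c [] = (entries.filter (fun e => e.2 == c)).map (fun e => e.1) := by
    intro c
    rw [hD, PySem.Dict.getD_foldl_modify_append, PySem.Dict.getD_empty]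
    rw [List.filter_map, List.map_map]
    simp [Function.comp_def]
  have hKeys : D.keys = PySem.Set.ofList colours := by
    have hk := PySem.Dict.keys_foldl_modify_key (entries.map Prod.swap)
      (fun q => q.1) ([] : List Int) (fun d q => fun v => v ++ [q.2]) PySem.Dict.empty
    have he : (PySem.Dict.empty : PySem.Dict Int (List Int)).keys = ([] : List Int) := rfl
    rw [he] at hk
    rw [hk, PySem.Set.update_nil_left, List.map_map]
    show PySem.Set.ofList (entries.map (Prod.fst ∘ Prod.swap)) = _
    have : (Prod.fst ∘ Prod.swap : Int × Int → Int) = fun e => e.2 := rfl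
    rw [this]
  -- counts: group size = multiplicity of the colour
  have hCnt : ∀ c : Int, (D.getD c []).length = colours.count c := by
    intro c
    rw [hGetD c, List.length_map, List.count_eq_countP, List.countP_map,
      List.countP_eq_length_filter]
    rfl
  -- rewrite the key filter into a colour-count filter
  have hPred : (fun c => (D.getD c []).length == 1) = (fun c : Int => colours.count c == 1) := by
    funext c; rw [hCnt c]
  rw [hKeys, hPred]
  -- the keys with multiplicity 1 are exactly the colours with multiplicity 1, in order
  rw [ofList_filter_of_count_le_one _ colours (by intro x hx; simp at hx; omega)]
  have hcf : colours.filter (fun c => colours.count c == 1)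
      = (entries.filter (fun e => colours.count e.2 == 1)).map (fun e => e.2) := by
    show (entries.map (fun e => e.2)).filter ((fun c => colours.count c == 1)) = _
    rw [List.filter_map]
    rfl
  rw [hcf, List.map_map]
  -- pointwise: the unique group of a multiplicity-1 colour is [index of its entry]
  apply List.map_congr_left
  intro e he
  have hent : e ∈ entries := List.mem_of_mem_filter he
  have hcount : colours.count e.2 = 1 := by
    have := List.of_mem_filter he
    simpa using this
  have hlen : ((entries.filter (fun x => x.2 == e.2)).map (fun x => x.1)).length = 1 := by
    rw [← hGetD e.2, hCnt e.2, hcount]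
  have hmem : e.1 ∈ (entries.filter (fun x => x.2 == e.2)).map (fun x => x.1) := by
    exact List.mem_map_of_mem (List.mem_filter.mpr ⟨hent, by simp⟩)
  obtain ⟨a, ha⟩ := List.length_eq_one_iff.mp hlen
  rw [ha] at hmem
  have : a = e.1 := (List.mem_singleton.mp hmem).symm
  simp only [Function.comp_def]
  rw [hGetD e.2, ha, this, PySem.List.pyGetD_zero_cons]

-- ---- B side ----

-- insertBy with a comparator deciding the first key preserves sortedness by that key
theorem pvInsertBy_pairwise (before : (Int × Int) → (Int × Int) → Bool)
    (hT : ∀ a b, before a b = true → a.1 ≤ b.1)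
    (hF : ∀ a b, before a b = false → b.1 ≤ a.1)
    (x : Int × Int) :
    ∀ l : List (Int × Int), l.Pairwise (fun a b => a.1 ≤ b.1) →
      (PySem.List.insertBy before x l).Pairwise (fun a b => a.1 ≤ b.1) := by
  intro l
  induction l with
  | nil => intro _; simp [PySem.List.insertBy]
  | cons y ys ih =>
    intro hp
    rw [List.pairwise_cons] at hp
    simp only [PySem.List.insertBy]
    by_cases hb : before x y = true
    · rw [if_pos hb]
      refine List.pairwise_cons.mpr ⟨?_, List.pairwise_cons.mpr hp⟩
      intro z hz
      rcases List.mem_cons.mp hz with hz | hz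
      · exact hz ▸ hT x y hb
      · exact le_trans (hT x y hb) (hp.1 z hz)
    · rw [if_neg hb]
      refine List.pairwise_cons.mpr ⟨?_, ih hp.2⟩
      intro z hz
      rcases (PySem.List.mem_insertBy before x z ys).mp hz with hz | hz
      · exact hz ▸ hF x y (by simpa using hb)
      · exact hp.1 z hz

-- the sorted2 output is nondecreasing in the first key
theorem pvSorted2_pairwise (xs : List (Int × Int)) :
    (PySem.List.sorted2 xs Prod.fst Prod.snd false).Pairwise (fun a b => a.1 ≤ b.1) := by
  show (xs.foldl (fun acc x => PySem.List.insertBy _ x acc) []).Pairwise _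
  have key : ∀ (l : List (Int × Int)) (acc : List (Int × Int)),
      acc.Pairwise (fun a b => a.1 ≤ b.1) →
      (l.foldl (fun acc x => PySem.List.insertBy
        (fun a b => decide (a.1 < b.1) || !decide (b.1 < a.1) && decide (a.2 < b.2))
        x acc) acc).Pairwise (fun a b => a.1 ≤ b.1) := by
    intro l
    induction l with
    | nil => intro acc h; exact h
    | cons x t ih =>
      intro acc h
      exact ih _ (pvInsertBy_pairwise _
        (by intro a b hab; simp only [Bool.or_eq_true, Bool.and_eq_true,
              decide_eq_true_eq, Bool.not_eq_true', decide_eq_false_iff_not] at hab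
            rcases hab with h1 | ⟨h1, _⟩ <;> omega)
        (by intro a b hab; simp only [Bool.or_eq_false_iff, Bool.and_eq_false_iff,
              decide_eq_false_iff_not, Bool.not_eq_false', decide_eq_true_eq] at hab
            omega)
        x acc h)
  exact key xs [] List.Pairwise.nil

-- past the equal-colour prefix everything is strictly larger
theorem pvDropWhile_gt (c : Int) :
    ∀ l : List (Int × Int), l.Pairwise (fun a b => a.1 ≤ b.1) →
      (∀ q ∈ l, c ≤ q.1) →
      ∀ q ∈ l.dropWhile (fun x => x.1 == c), c < q.1 := by
  intro l
  induction l with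
  | nil => intro _ _ q hq; simp [List.dropWhile] at hq
  | cons r t ih =>
    intro hp hle q hq
    rw [List.pairwise_cons] at hp
    by_cases hr : (r.1 == c) = true
    · rw [List.dropWhile_cons, if_pos hr] at hq
      exact ih hp.2 (fun q hq => hle q (List.mem_cons_of_mem r hq)) q hq
    · rw [List.dropWhile_cons, if_neg hr] at hq
      have hrc : r.1 ≠ c := by simpa using hr
      have hcr : c < r.1 := lt_of_le_of_ne (hle r (List.mem_cons_self)) (Ne.symm hrc)
      rcases List.mem_cons.mp hq with hq | hq
      · exact hq ▸ hcr
      · exact lt_of_lt_of_le hcr (hp.1 q hq)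

-- the run scan of a colour-sorted list keeps exactly the records of multiplicity-1 colours
theorem pvRunScan_eq_filter :
    ∀ s : List (Int × Int), s.Pairwise (fun a b => a.1 ≤ b.1) →
      pvRunScan s
        = (s.filter (fun e => (s.map Prod.fst).count e.1 == 1)).map Prod.snd := by
  intro s
  induction s using pvRunScan.induct with
  | case1 => intro _; simp [pvRunScan]
  | case2 e rest hemp ih =>
    intro hp
    rw [List.pairwise_cons] at hp
    have hsplit : rest = rest.takeWhile (fun q => q.1 == e.1)
        ++ rest.dropWhile (fun q => q.1 == e.1) := (List.takeWhile_append_dropWhile).symm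
    have htw : rest.takeWhile (fun q => q.1 == e.1) = [] :=
      List.isEmpty_iff.mp hemp
    have hrest : rest.dropWhile (fun q => q.1 == e.1) = rest := by
      conv_rhs => rw [hsplit]
      rw [htw, List.nil_append]
    have hgt : ∀ q ∈ rest, e.1 < q.1 := by
      intro q hq
      rw [← hrest] at hq
      exact pvDropWhile_gt e.1 rest hp.2 hp.1 q hq
    have hcnt0 : (rest.map Prod.fst).count e.1 = 0 := by
      rw [List.count_eq_zero]
      intro hmem
      rcases List.mem_map.mp hmem with ⟨q, hq, hq1⟩
      exact absurd (hq1 ▸ hgt q hq) (lt_irrefl _)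
    have ih' : pvRunScan rest
        = (rest.filter (fun e => (rest.map Prod.fst).count e.1 == 1)).map Prod.snd := by
      have h := ih (by rw [hrest]; exact hp.2)
      rwa [hrest] at h
    rw [pvRunScan, if_pos hemp, hrest, List.map_cons, List.filter_cons]
    rw [List.count_cons_self, hcnt0]
    simp only [beq_self_eq_true, if_pos]
    rw [List.map_cons]
    congr 1
    rw [ih']
    congr 1
    apply List.filter_congr
    intro q hq
    have hne : q.1 ≠ e.1 := ne_of_gt (hgt q hq)
    simp [Ne.symm hne]
  | case3 e rest hemp ih =>
    intro hp
    rw [List.pairwise_cons] at hp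
    set same := rest.takeWhile (fun q => q.1 == e.1) with hsame
    set rest' := rest.dropWhile (fun q => q.1 == e.1) with hrest'
    have hsplit : rest = same ++ rest' := (List.takeWhile_append_dropWhile).symm
    have hsameq : ∀ q ∈ same, q.1 = e.1 := by
      intro q hq
      have := List.mem_takeWhile_imp hq
      simpa using this
    have hgt : ∀ q ∈ rest', e.1 < q.1 :=
      fun q hq => pvDropWhile_gt e.1 rest hp.2 hp.1 q hq
    have hrp : rest'.Pairwise (fun a b => a.1 ≤ b.1) :=
      hp.2.sublist (hsplit ▸ List.sublist_append_right same rest')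
    have hsne : same ≠ [] := by
      intro h; exact absurd (List.isEmpty_iff.mpr h) (by simpa using hemp)
    have hslen : 1 ≤ same.length := List.length_pos_of_ne_nil hsne
    have hcnt_same : (same.map Prod.fst).count e.1 = same.length := by
      rw [List.count_eq_length.mpr, List.length_map]
      intro b hb
      rcases List.mem_map.mp hb with ⟨q, hq, hq1⟩
      exact (hq1 ▸ (hsameq q hq)).symm ▸ rfl
    have hzero : ∀ c : Int, e.1 < c → (same.map Prod.fst).count c = 0 := by
      intro c hc
      rw [List.count_eq_zero]
      intro hmem
      rcases List.mem_map.mp hmem with ⟨q, hq, hq1⟩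
      exact absurd (hq1 ▸ hsameq q hq) (by omega)
    have hzero' : (rest'.map Prod.fst).count e.1 = 0 := by
      rw [List.count_eq_zero]
      intro hmem
      rcases List.mem_map.mp hmem with ⟨q, hq, hq1⟩
      exact absurd (hq1 ▸ hgt q hq) (lt_irrefl _)
    have hA : (rest.map Prod.fst).count e.1 = same.length := by
      rw [hsplit, List.map_append, List.count_append, hcnt_same, hzero']
      omega
    have hB : ∀ q ∈ rest', (rest.map Prod.fst).count q.1 = (rest'.map Prod.fst).count q.1 := by
      intro q hq
      rw [hsplit, List.map_append, List.count_append, hzero q.1 (hgt q hq)]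
      omega
    have hCe : ((e :: rest).map Prod.fst).count e.1 = 1 + same.length := by
      rw [List.map_cons, List.count_cons_self, hA]
      omega
    have hCq : ∀ q ∈ rest', ((e :: rest).map Prod.fst).count q.1
        = (rest'.map Prod.fst).count q.1 := by
      intro q hq
      have hne : q.1 ≠ e.1 := ne_of_gt (hgt q hq)
      rw [List.map_cons, ← hB q hq]
      simp [List.count_cons]
      exact Ne.symm hne
    rw [pvRunScan, if_neg hemp, ih hrp]
    generalize hL : List.map Prod.fst (e :: rest) = L at hCe hCq ⊢
    rw [List.filter_cons, if_neg (by simp [hCe]; omega)]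
    conv_rhs => rw [hsplit]
    rw [List.filter_append, List.map_append]
    have hfs : same.filter (fun q => (L.count q.1 == 1)) = [] := by
      rw [List.filter_eq_nil_iff]
      intro q hq
      rw [hsameq q hq]
      simp [hCe]
      omega
    rw [hfs, List.map_nil, List.nil_append]
    congr 1
    apply List.filter_congr
    intro q hq
    rw [hCq q hq]

-- the indexes of enumerate are strictly increasing
theorem pvEnumerate_pairwise {α : Type} :
    ∀ (xs : List α) (s : Int),
      (PySem.List.enumerate xs s).Pairwise (fun a b => a.1 < b.1) := by
  intro xs
  induction xs with
  | nil => intro s; simp [PySem.List.enumerate_nil]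
  | cons x t ih =>
    intro s
    rw [PySem.List.enumerate_cons]
    refine List.pairwise_cons.mpr ⟨?_, ih (s + 1)⟩
    intro p hp
    rcases (PySem.List.mem_enumerate_iff t (s + 1) p).mp hp with ⟨k, hk, hpk⟩
    rw [hpk]
    simp
    omega

-- A's output list has strictly increasing indexes
theorem pvA_pairwise (shapes : List (List (Int × Int))) (grid : List (List Int)) :
    (((pvEnt shapes grid).filter
        (fun e => ((pvEnt shapes grid).map (fun e => e.2)).count e.2 == 1)).map
        (fun e => e.1)).Pairwise (· < ·) := by
  rw [List.pairwise_map]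
  apply List.Pairwise.filter
  unfold pvEnt
  rw [List.pairwise_map]
  apply List.Pairwise.filter
  exact pvEnumerate_pairwise shapes 0

theorem find_unique_equal (shapes : List (List (Int × Int))) (grid : List (List Int)) :
    find_unique_c909285e shapes grid = find_unique_c909285e_alt shapes grid := by
  unfold find_unique_c909285e_alt
  simp only []
  set ent := pvEnt shapes grid with hent
  set cE := (((PySem.List.enumerate shapes 0).filter (fun p => 1 < p.2.length)).map
      (fun p => (get_colour (PySem.List.pyGetD p.2 0 (0, 0)) grid, p.1))) with hcE
  have hswap : cE = ent.map Prod.swap := by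
    rw [hcE, hent]; unfold pvEnt
    rw [List.map_map]; rfl
  set s := PySem.List.sorted2 cE Prod.fst Prod.snd false with hs
  have hperm : s.Perm cE := PySem.List.sorted2_perm cE Prod.fst Prod.snd false
  -- the run scan of s, as a filter of s
  have h1 : pvRunScan s
      = (s.filter (fun e => (s.map Prod.fst).count e.1 == 1)).map Prod.snd :=
    pvRunScan_eq_filter s (pvSorted2_pairwise cE)
  -- the multiplicity predicate over s equals the one over cE (counts respect the perm)
  have h2 : (fun e : Int × Int => (s.map Prod.fst).count e.1 == 1)
      = (fun e : Int × Int => (cE.map Prod.fst).count e.1 == 1) := by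
    funext e
    rw [(hperm.map Prod.fst).count_eq]
  -- A's output, as the snd-projection of the cE filter
  have h3 : ((ent.filter (fun e => (ent.map (fun e => e.2)).count e.2 == 1)).map
        (fun e => e.1))
      = (cE.filter (fun e => (cE.map Prod.fst).count e.1 == 1)).map Prod.snd := by
    rw [hswap, List.filter_map, List.map_map, List.map_map]
    rfl
  -- the permutation between the run-scan output and A's output
  have h4 : (((pvEnt shapes grid).filter
        (fun e => ((pvEnt shapes grid).map (fun e => e.2)).count e.2 == 1)).map
        (fun e => e.1)).Perm (pvRunScan s) := by
    rw [h1, h2, ← hent, h3]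
    exact ((hperm.filter _).map Prod.snd).symm
  rw [pvA_countForm shapes grid]
  exact (PySem.List.sorted_eq_of_perm_of_pairwise_lt (pvRunScan s) _ (fun x => x)
    h4 (pvA_pairwise shapes grid)).symm

-- ===== VERDICT (by name: the statement is the Claim_ definition above) =====
theorem find_unique_c909285e_spec : Claim_equal_find_unique_c909285e := by
  intro shapes grid _ _
  unfold Spec_find_unique_c909285e
  exact find_unique_equal shapes grid
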